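-- pv_equiv track=rewrite | github.com/LuticDenisa/Python | lab2/ex4.py | song
-- ===== SOURCE A (Python) =====
-- def song(notes, moves, start_pos):
--     song = []
--     current_pos = start_pos
--     song.append(notes[current_pos])
--
--     for move in moves:
--         current_pos = (current_pos + move) % len(notes)
--         song.append(notes[current_pos])
--
--     return song
-- ===== SOURCE B (Python) =====
-- def song(notes, moves, start_pos):
--     out = [notes[start_pos]]          # raw index first, exactly like A
--     n = len(notes)
--     # rotated copy of notes whose head is always the current note
--     rot = notes[start_pos % n:] + notes[:start_pos % n]
--     for move in moves:
--         k = move % n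
--         rot = rot[k:] + rot[:k]
--         out.append(rot[0])
--     return out
-- ===== Notes on version B (the rewrite author's own statement) =====
-- stated objective: alternative
-- what changed: B replaces A's integer position arithmetic with a rotated-list data structure: it keeps a rotation of notes whose head is always the current note, rotates it by move % n each step via slicing, and reads the head, so no running index into notes is maintained at all.
import Mathlib
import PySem

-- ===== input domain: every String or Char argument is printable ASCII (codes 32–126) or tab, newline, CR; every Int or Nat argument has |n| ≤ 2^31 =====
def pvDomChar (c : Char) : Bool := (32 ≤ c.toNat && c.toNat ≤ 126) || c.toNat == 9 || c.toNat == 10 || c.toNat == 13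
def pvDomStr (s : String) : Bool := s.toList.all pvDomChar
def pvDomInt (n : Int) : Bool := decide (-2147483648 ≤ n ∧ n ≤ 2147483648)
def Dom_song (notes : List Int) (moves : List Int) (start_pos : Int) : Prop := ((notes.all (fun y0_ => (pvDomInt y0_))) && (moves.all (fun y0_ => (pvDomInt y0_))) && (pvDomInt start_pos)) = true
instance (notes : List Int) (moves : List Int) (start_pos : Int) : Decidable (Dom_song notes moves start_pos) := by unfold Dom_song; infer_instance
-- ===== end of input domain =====

-- B keeps a rotated copy of notes whose head is the current note and rotates it by move % n
-- each step, instead of A's running mod-reduced integer index; objective: alternative algorithm/data structure.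


-- ===== PORT A =====
-- state = (current_pos, song list); each step mod-reduces the position and appends the note
def song (notes : List Int) (moves : List Int) (start_pos : Int) : List Int :=
  let first := PySem.List.pyGetD notes start_pos 0
  (moves.foldl
    (fun (st : Int × List Int) move =>
      let p := PySem.Int.mod (st.1 + move) (notes.length : Int)
      (p, st.2 ++ [PySem.List.pyGetD notes p 0]))
    (start_pos, [first])).2

-- ===== PORT B =====
-- state = (rot, out): rot is the rotation of notes whose head is the current note;
-- each step re-slices rot by move % n and reads its head
def song_alt (notes : List Int) (moves : List Int) (start_pos : Int) : List Int :=
  let first := PySem.List.pyGetD notes start_pos 0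
  let n : Int := (notes.length : Int)
  let r0 := PySem.Int.mod start_pos n
  let rot0 := PySem.List.slice notes (some r0) none ++ PySem.List.slice notes none (some r0)
  (moves.foldl
    (fun (st : List Int × List Int) move =>
      let k := PySem.Int.mod move n
      let rot := PySem.List.slice st.1 (some k) none ++ PySem.List.slice st.1 none (some k)
      (rot, st.2 ++ [PySem.List.pyGetD rot 0 0]))
    (rot0, [first])).2

-- ===== PRECONDITION & SPEC =====
-- Pre_: the initial raw index notes[start_pos] must be valid (Python raises IndexError otherwise;
-- this also forces notes ≠ [], so every later '% len(notes)' is well defined).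
def Pre_song (notes : List Int) (moves : List Int) (start_pos : Int) : Prop :=
  PySem.Raise.InRange notes.length start_pos
instance (notes : List Int) (moves : List Int) (start_pos : Int) : Decidable (Pre_song notes moves start_pos) := by unfold Pre_song; infer_instance
def pvWitness_song : List Int × List Int × Int := ([4, 7, 2], [2, -1, 5], 1)

def Spec_song (notes : List Int) (moves : List Int) (start_pos : Int) (out : List Int) : Prop := out = song_alt notes moves start_pos
instance (notes : List Int) (moves : List Int) (start_pos : Int) (out : List Int) : Decidable (Spec_song notes moves start_pos out) := by unfold Spec_song; infer_instance

-- ===== CLAIM (what is proved, stated in full; the proofs are below) =====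
def Claim_equal_song : Prop := ∀ (notes : List Int) (moves : List Int) (start_pos : Int), Dom_song notes moves start_pos → Pre_song notes moves start_pos → Spec_song notes moves start_pos (song notes moves start_pos)

-- ===== LEMMAS AND PROOFS =====

-- B's slice pair on a nonneg in-range amount is List.rotate
theorem song_slices_eq_rotate (l : List Int) (k : Int) (hk0 : 0 ≤ k) (hk : k.toNat ≤ l.length) :
    PySem.List.slice l (some k) none ++ PySem.List.slice l none (some k) = l.rotate k.toNat := by
  rw [PySem.List.slice_from l hk0, PySem.List.slice_to l hk0,
    List.rotate_eq_drop_append_take hk]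

-- loop invariant: A's fold from position p and B's fold from notes.rotate c, with
-- c ≡ p (mod len notes), build the same song list
theorem song_loop (notes : List Int) (hn : notes ≠ []) (moves : List Int)
    (p : Int) (c : Nat) (acc : List Int)
    (h : (c : Int) % (notes.length : Int) = PySem.Int.mod p (notes.length : Int)) :
    (moves.foldl
      (fun (st : Int × List Int) move =>
        let q := PySem.Int.mod (st.1 + move) (notes.length : Int)
        (q, st.2 ++ [PySem.List.pyGetD notes q 0]))
      (p, acc)).2
    = (moves.foldl
      (fun (st : List Int × List Int) move =>
        let k := PySem.Int.mod move (notes.length : Int)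
        let rot := PySem.List.slice st.1 (some k) none ++ PySem.List.slice st.1 none (some k)
        (rot, st.2 ++ [PySem.List.pyGetD rot 0 0]))
      (notes.rotate c, acc)).2 := by
  induction moves generalizing p c acc with
  | nil => rfl
  | cons m rest ih =>
    have hl : 0 < notes.length := List.length_pos_of_ne_nil hn
    have hn' : (0 : Int) < (notes.length : Int) := by exact_mod_cast hl
    set q := PySem.Int.mod (p + m) (notes.length : Int) with hq
    set k := PySem.Int.mod m (notes.length : Int) with hk
    have hk0 : 0 ≤ k := PySem.Int.mod_nonneg m hn'
    have hk1 : k < (notes.length : Int) := PySem.Int.mod_lt m hn'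
    have hq0 : 0 ≤ q := PySem.Int.mod_nonneg _ hn'
    have hq1 : q < (notes.length : Int) := PySem.Int.mod_lt _ hn'
    have hkle : k.toNat ≤ (notes.rotate c).length := by
      rw [List.length_rotate]; omega
    have hrot : PySem.List.slice (notes.rotate c) (some k) none
        ++ PySem.List.slice (notes.rotate c) none (some k)
        = notes.rotate (c + k.toNat) := by
      rw [song_slices_eq_rotate _ k hk0 hkle, List.rotate_rotate]
    have hcast : ((c + k.toNat : Nat) : Int) % (notes.length : Int) = q := by
      have hke : ((k.toNat : Nat) : Int) = k := Int.toNat_of_nonneg hk0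
      have h' := h
      rw [PySem.Int.mod_eq_emod_of_pos hn'] at h'
      have hkm : k % (notes.length : Int) = k := by
        rw [hk, PySem.Int.mod_eq_emod_of_pos hn', Int.emod_emod_of_dvd _ dvd_rfl,
          ← PySem.Int.mod_eq_emod_of_pos hn']
      calc ((c + k.toNat : Nat) : Int) % (notes.length : Int)
          = ((c : Int) + k) % (notes.length : Int) := by push_cast [hke]; ring_nf
        _ = ((c : Int) % (notes.length : Int) + k % (notes.length : Int)) % (notes.length : Int) := Int.add_emod _ _ _
        _ = (p % (notes.length : Int) + m % (notes.length : Int)) % (notes.length : Int) := by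
            rw [h', hkm, hk, PySem.Int.mod_eq_emod_of_pos hn']
        _ = (p + m) % (notes.length : Int) := (Int.add_emod _ _ _).symm
        _ = q := by rw [hq, PySem.Int.mod_eq_emod_of_pos hn']
    have hidx : (c + k.toNat) % notes.length = q.toNat := by
      have h2 : (((c + k.toNat) % notes.length : Nat) : Int) = q := by
        push_cast
        exact_mod_cast hcast
      omega
    have helem : PySem.List.pyGetD (notes.rotate (c + k.toNat)) 0 0
        = PySem.List.pyGetD notes q 0 := by
      rw [PySem.List.pyGetD_zero,
        List.getD_eq_getElem _ _ (by rw [List.length_rotate]; exact hl),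
        List.getElem_rotate, PySem.List.pyGetD_eq_getElem notes 0 hq0 hq1]
      simp only [Nat.zero_add, hidx]
    simp only [List.foldl_cons]
    show (rest.foldl
        (fun (st : Int × List Int) move =>
          let q := PySem.Int.mod (st.1 + move) (notes.length : Int)
          (q, st.2 ++ [PySem.List.pyGetD notes q 0]))
        (q, acc ++ [PySem.List.pyGetD notes q 0])).2
      = (rest.foldl
        (fun (st : List Int × List Int) move =>
          let k := PySem.Int.mod move (notes.length : Int)
          let rot := PySem.List.slice st.1 (some k) none ++ PySem.List.slice st.1 none (some k)
          (rot, st.2 ++ [PySem.List.pyGetD rot 0 0]))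
        (PySem.List.slice (notes.rotate c) (some k) none
          ++ PySem.List.slice (notes.rotate c) none (some k),
         acc ++ [PySem.List.pyGetD (PySem.List.slice (notes.rotate c) (some k) none
          ++ PySem.List.slice (notes.rotate c) none (some k)) 0 0])).2
    rw [hrot, helem]
    exact ih q (c + k.toNat) _ (by
      rw [hcast, PySem.Int.mod_eq_emod_of_pos hn']
      exact (Int.emod_eq_of_lt hq0 hq1).symm)

-- ===== VERDICT (by name: the statement is the Claim_ definition above) =====
theorem song_spec : Claim_equal_song := by
  intro notes moves start_pos _ hpre
  unfold Pre_song at hpre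
  unfold Spec_song song song_alt
  have hn : notes ≠ [] := by
    intro hnil
    subst hnil
    simp [PySem.Raise.InRange] at hpre
    omega
  have hl : 0 < notes.length := List.length_pos_of_ne_nil hn
  have hn' : (0 : Int) < (notes.length : Int) := by exact_mod_cast hl
  set r0 := PySem.Int.mod start_pos (notes.length : Int) with hr0
  have hr00 : 0 ≤ r0 := PySem.Int.mod_nonneg _ hn'
  have hr01 : r0 < (notes.length : Int) := PySem.Int.mod_lt _ hn'
  show (moves.foldl
      (fun (st : Int × List Int) move =>
        let q := PySem.Int.mod (st.1 + move) (notes.length : Int)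
        (q, st.2 ++ [PySem.List.pyGetD notes q 0]))
      (start_pos, [PySem.List.pyGetD notes start_pos 0])).2
    = (moves.foldl
      (fun (st : List Int × List Int) move =>
        let k := PySem.Int.mod move (notes.length : Int)
        let rot := PySem.List.slice st.1 (some k) none ++ PySem.List.slice st.1 none (some k)
        (rot, st.2 ++ [PySem.List.pyGetD rot 0 0]))
      (PySem.List.slice notes (some r0) none ++ PySem.List.slice notes none (some r0),
       [PySem.List.pyGetD notes start_pos 0])).2
  rw [song_slices_eq_rotate notes r0 hr00 (by omega)]
  exact song_loop notes hn moves start_pos r0.toNat _ (by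
    rw [Int.toNat_of_nonneg hr00, hr0, PySem.Int.mod_eq_emod_of_pos hn',
      Int.emod_emod_of_dvd _ dvd_rfl, ← PySem.Int.mod_eq_emod_of_pos hn'])
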